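-- pv_equiv track=rewrite | github.com/SadiqahMushtaq/Computational_Intelligence-Project | rule_Generator.py | helper
-- ===== SOURCE A (Python) =====
-- def helper(s):
--     """
--     Helper function to count the number of 'F's in a string.
--
--     Args:
--         s (str): The string to count 'F's.
--
--     Returns:
--         int: Number of 'F's in the string.
--     """
--     count = 0
--     for i in range(len(s)-1, -1, -1):
--         if s[i] == 'F':
--             count += 1
--         if s[i] == '[':
--             return count
--     return count
-- ===== SOURCE B (Python) =====
-- def helper(s):
--     # Forward single pass: count 'F's, resetting the counter at every '['.
--     # At the end the counter holds the number of 'F's after the last '['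
--     # (or in the whole string if there is none) -- exactly A's answer.
--     count = 0
--     for c in s:
--         if c == '[':
--             count = 0
--         elif c == 'F':
--             count += 1
--     return count
-- ===== Notes on version B (the rewrite author's own statement) =====
-- stated objective: alternative
-- what changed: Replaces A's backward index loop with early exit at the first '[' by a forward single pass that counts 'F's and resets the counter to zero at every '[', so the final counter is the F-count after the last '['.
import Mathlib
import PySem

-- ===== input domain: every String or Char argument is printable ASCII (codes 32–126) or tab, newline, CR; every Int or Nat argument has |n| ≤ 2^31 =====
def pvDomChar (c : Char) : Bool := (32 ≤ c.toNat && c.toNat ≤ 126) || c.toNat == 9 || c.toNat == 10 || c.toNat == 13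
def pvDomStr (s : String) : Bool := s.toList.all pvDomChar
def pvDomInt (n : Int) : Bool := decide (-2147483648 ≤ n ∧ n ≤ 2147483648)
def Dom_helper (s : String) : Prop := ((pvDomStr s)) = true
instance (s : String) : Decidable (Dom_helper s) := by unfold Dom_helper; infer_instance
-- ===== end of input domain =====

-- B replaces A's backward scan with early exit by a forward pass that resets its 'F' counter at each '[' (alternative decomposition).


-- ===== PORT A =====
-- A iterates i from len(s)-1 down to 0: counts 'F', returns early on '['.
-- Ported as an accumulator recursion over the reversed character list.
def helperGo : Int → List Char → Int
  | acc, [] => acc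
  | acc, c :: cs =>
    let acc' := if c = 'F' then acc + 1 else acc
    if c = '[' then acc' else helperGo acc' cs

def helper (s : String) : Int := helperGo 0 s.toList.reverse

-- ===== PORT B =====
-- B scans forward once: reset the counter on '[', increment on 'F'.
def helper_alt (s : String) : Int :=
  s.toList.foldl (fun count c => if c = '[' then 0 else if c = 'F' then count + 1 else count) 0

-- ===== PRECONDITION & SPEC =====
def Spec_helper (s : String) (out : Int) : Prop := out = helper_alt s
instance (s : String) (out : Int) : Decidable (Spec_helper s out) := by unfold Spec_helper; infer_instance

-- ===== CLAIM (what is proved, stated in full; the proofs are below) =====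
def Claim_equal_helper : Prop := ∀ (s : String), Dom_helper s → Spec_helper s (helper s)

-- ===== LEMMAS AND PROOFS =====

-- the common value both loops compute: 'F'-count of the trailing '['-free run
def trailCount (l : List Char) : Int :=
  ((l.reverse.takeWhile (fun x => x ≠ '[')).count 'F' : Int)

-- A-side loop: the accumulator recursion counts 'F' in the longest '['-free prefix.
theorem helperGo_eq (r : List Char) : ∀ (acc : Int),
    helperGo acc r = acc + ((r.takeWhile (fun x => x ≠ '[')).count 'F' : Int) := by
  induction r with
  | nil => intro acc; simp [helperGo]
  | cons c cs ih =>
    intro acc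
    by_cases hb : c = '['
    · subst hb; simp [helperGo]
    · by_cases hf : c = 'F'
      · subst hf
        simp [helperGo, hb, ih]
        ring
      · simp [helperGo, hb, hf, ih]

-- how prepending one character changes the trailing '['-free run's 'F'-count
theorem trailCount_cons (c : Char) (cs : List Char) :
    trailCount (c :: cs) =
      if '[' ∈ cs then trailCount cs
      else if c = 'F' then trailCount cs + 1 else trailCount cs := by
  unfold trailCount
  rw [List.reverse_cons, List.takeWhile_append]
  by_cases hm : '[' ∈ cs
  · have hne : ¬ (cs.reverse.takeWhile (fun x => x ≠ '[')).length = cs.reverse.length := by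
      intro hl
      have heq := (List.takeWhile_prefix (l := cs.reverse)
        (fun x => x ≠ '[')).eq_of_length hl
      have := (List.takeWhile_eq_self_iff.mp heq) '[' (by simpa using hm)
      simp at this
    rw [if_neg hne, if_pos hm]
  · have heq : cs.reverse.takeWhile (fun x => x ≠ '[') = cs.reverse := by
      apply List.takeWhile_eq_self_iff.mpr
      intro x hx
      have : x ∈ cs := List.mem_reverse.mp hx
      simp only [decide_eq_true_eq]
      exact fun he => hm (he ▸ this)
    have heq' : cs.reverse.takeWhile (fun x : Char => !decide (x = '[')) = cs.reverse := by
      simpa using heq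
    rw [if_pos (by rw [heq]), if_neg hm]
    by_cases hb : c = '['
    · subst hb
      simp only [List.takeWhile]
      simp [heq', List.count_reverse]
    · by_cases hf : c = 'F'
      · subst hf
        simp only [List.takeWhile]
        simp [hb, heq', List.count_append, List.count_reverse]
      · simp only [List.takeWhile]
        simp [hb, hf, heq', List.count_append, List.count_reverse]

-- B-side loop invariant: the fold equals the trailing count, plus acc when no '[' occurs.
theorem fold_reset (l : List Char) : ∀ (acc : Int),
    l.foldl (fun count c => if c = '[' then 0 else if c = 'F' then count + 1 else count) acc
      = (if '[' ∈ l then 0 else acc) + trailCount l := by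
  induction l with
  | nil => intro acc; simp [trailCount]
  | cons c cs ih =>
    intro acc
    rw [List.foldl_cons, ih, trailCount_cons]
    by_cases hm : '[' ∈ cs
    · simp [hm]
    · by_cases hb : c = '['
      · subst hb; simp [hm]
      · by_cases hf : c = 'F'
        · subst hf; simp [hm, hb, Ne.symm hb]; ring
        · simp [hm, hb, hf, Ne.symm hb]

theorem helper_eq_trail (s : String) : helper s = trailCount s.toList := by
  simp [helper, helperGo_eq, trailCount]

theorem helper_alt_eq_trail (s : String) : helper_alt s = trailCount s.toList := by
  unfold helper_alt
  rw [fold_reset]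
  split_ifs <;> simp

-- ===== VERDICT (by name: the statement is the Claim_ definition above) =====
theorem helper_spec : Claim_equal_helper := by
  intro s _
  unfold Spec_helper
  rw [helper_eq_trail, helper_alt_eq_trail]
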